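-- pv_equiv track=rewrite | github.com/mrbartrns/programmers-algorithm | print_star/star_5.py | print_star
-- ===== SOURCE A (Python) =====
-- def print_star(n, k):
--     if n == 1:
--         return " " * k + "*"
--     else:
--         string = ""
--         string += print_star(n - 1, k + 1) + "\n"
--         string += " " * k + "*" * (2 * n - 1)
--         return string
-- ===== SOURCE B (Python) =====
-- def print_star(n, k):
--     lines = [" " * (k + n - i) + "*" * (2 * i - 1) for i in range(1, n + 1)]
--     return "\n".join(lines)
-- ===== Notes on version B (the rewrite author's own statement) =====
-- stated objective: faster
-- what changed: Replaced the recursive per-level string concatenation (which rebuilds the growing prefix string at every level) by a single flat list comprehension over range(1, n+1) using closed-form offset/width formulas, joined once with '\n'.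
import Mathlib
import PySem

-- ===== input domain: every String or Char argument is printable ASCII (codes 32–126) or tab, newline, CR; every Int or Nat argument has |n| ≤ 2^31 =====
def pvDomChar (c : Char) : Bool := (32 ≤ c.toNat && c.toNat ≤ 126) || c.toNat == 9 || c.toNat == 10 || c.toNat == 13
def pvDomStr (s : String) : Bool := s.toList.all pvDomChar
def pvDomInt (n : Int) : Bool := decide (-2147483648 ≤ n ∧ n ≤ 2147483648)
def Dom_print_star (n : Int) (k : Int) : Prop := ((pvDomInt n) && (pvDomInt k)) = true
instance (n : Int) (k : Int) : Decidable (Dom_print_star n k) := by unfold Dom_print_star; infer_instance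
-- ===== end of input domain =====

-- B replaces A's level-by-level recursion with one flat pass over range(1, n+1) using
-- closed-form offset/width per line; simpler, same output for n ≥ 1 (return value only).

-- ===== PORT A =====
-- recursive, on List Char (PySem string primitives); the n ≤ 0 branch is a totality
-- guard only: Python recurses forever there (excluded by Pre_print_star)
def printStarCharsA (n : Int) (k : Int) : List Char :=
  if n = 1 then PySem.List.pyRepeat [' '] k ++ ['*']
  else if n ≤ 1 then []
  else printStarCharsA (n - 1) (k + 1) ++ ['\n'] ++
       (PySem.List.pyRepeat [' '] k ++ PySem.List.pyRepeat ['*'] (2 * n - 1))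
termination_by n.toNat
decreasing_by omega

def print_star (n : Int) (k : Int) : String := String.ofList (printStarCharsA n k)

-- ===== PORT B =====
def printStarLineB (n : Int) (k : Int) (i : Int) : List Char :=
  PySem.List.pyRepeat [' '] (k + n - i) ++ PySem.List.pyRepeat ['*'] (2 * i - 1)

def print_star_alt (n : Int) (k : Int) : String :=
  String.ofList (PySem.Chars.join ['\n']
    ((PySem.List.pyRange 1 (n + 1) 1).map (printStarLineB n k)))

-- ===== PRECONDITION & SPEC =====
-- Pre_ excludes n ≤ 0, on which the Python A recurses forever (RecursionError)
def Pre_print_star (n : Int) (k : Int) : Prop := 1 ≤ n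
instance (n : Int) (k : Int) : Decidable (Pre_print_star n k) := by unfold Pre_print_star; infer_instance
def pvWitness_print_star : Int × Int := (3, 2)

def Spec_print_star (n : Int) (k : Int) (out : String) : Prop := out = print_star_alt n k
instance (n : Int) (k : Int) (out : String) : Decidable (Spec_print_star n k out) := by unfold Spec_print_star; infer_instance

-- ===== CLAIM (what is proved, stated in full; the proofs are below) =====
def Claim_equal_print_star : Prop := ∀ (n : Int) (k : Int), Dom_print_star n k → Pre_print_star n k → Spec_print_star n k (print_star n k)

-- ===== LEMMAS AND PROOFS =====

theorem chars_join_append_singleton (sep : List Char) (p : List Char) (l : List (List Char)) (x : List Char) :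
    PySem.Chars.join sep ((p :: l) ++ [x]) = PySem.Chars.join sep (p :: l) ++ sep ++ x := by
  induction l generalizing p with
  | nil => simp [PySem.Chars.join_cons_cons, PySem.Chars.join_singleton]
  | cons q l ih =>
      show PySem.Chars.join sep (p :: q :: (l ++ [x])) = _
      rw [PySem.Chars.join_cons_cons sep p q (l ++ [x]),
          show q :: (l ++ [x]) = (q :: l) ++ [x] from (List.cons_append (a := q) (as := l) (bs := [x])).symm,
          ih q, PySem.Chars.join_cons_cons]
      simp

theorem printStar_chars_eq (m : Nat) (n k : Int) (hm : n.toNat = m) (hn : 1 ≤ n) :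
    printStarCharsA n k =
      PySem.Chars.join ['\n'] ((PySem.List.pyRange 1 (n + 1) 1).map (printStarLineB n k)) := by
  induction m generalizing n k with
  | zero => omega
  | succ m ih =>
      by_cases h1 : n = 1
      · subst h1
        rw [printStarCharsA]
        have hr : PySem.List.pyRange 1 (1 + 1) 1 = [1] := PySem.List.pyRange_one_singleton 1
        rw [if_pos rfl, hr, List.map_singleton, PySem.Chars.join_singleton]
        simp [printStarLineB]
      · have h2 : 2 ≤ n := by omega
        rw [printStarCharsA]
        rw [if_neg h1, if_neg (by omega)]
        rw [ih (n - 1) (k + 1) (by omega) (by omega)]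
        -- the per-line formula for (n-1, k+1) is the same as for (n, k)
        have hfun : printStarLineB (n - 1) (k + 1) = printStarLineB n k := by
          funext i; simp only [printStarLineB]; ring_nf
        have hidx : n - 1 + 1 = n := by omega
        rw [hfun, hidx]
        have hsplit : PySem.List.pyRange 1 (n + 1) 1 = PySem.List.pyRange 1 n 1 ++ [n] :=
          PySem.List.pyRange_one_succ_right (by omega)
        rw [hsplit, List.map_append, List.map_singleton]
        obtain ⟨p, l, hpl⟩ : ∃ p l, (PySem.List.pyRange 1 n 1).map (printStarLineB n k) = p :: l := by
          have hne : PySem.List.pyRange 1 n 1 ≠ [] := by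
            rw [PySem.List.pyRange_one_cons (by omega)]; simp
          rcases hx : (PySem.List.pyRange 1 n 1).map (printStarLineB n k) with _ | ⟨p, l⟩
          · exact absurd (List.map_eq_nil_iff.mp hx) hne
          · exact ⟨p, l, rfl⟩
        rw [hpl, chars_join_append_singleton]
        have hline : printStarLineB n k n =
            PySem.List.pyRepeat [' '] k ++ PySem.List.pyRepeat ['*'] (2 * n - 1) := by
          simp [printStarLineB]
        rw [hline]

-- ===== VERDICT (by name: the statement is the Claim_ definition above) =====
theorem print_star_spec : Claim_equal_print_star := by
  intro n k _ hpre
  show print_star n k = print_star_alt n k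
  unfold print_star print_star_alt
  rw [printStar_chars_eq n.toNat n k rfl hpre]
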